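-- pv_equiv track=rewrite | github.com/jSchiffart/2048_py_game | j2048_motor_45122.py | somar_esquerda
-- ===== SOURCE A (Python) =====
-- def somar_esquerda(uma_lista):
--     resultado=[]
--     llista=len(uma_lista)
--     pontos=0
--     indice=0
--     while indice<llista-1:
--         valor=uma_lista[indice]
--         if valor==uma_lista[indice+1]:
--             soma=valor+valor
--             resultado.append(soma)
--             pontos=pontos+soma
--             indice=indice+2
--         else:
--             resultado.append(valor)
--             indice=indice+1
--     if indice==llista-1:#tratar a ultima posiçao quando nao é igual à penultima
--         resultado.append(uma_lista[indice])
--     while len(resultado)<llista: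
--         resultado.append(0)
--     return (resultado, pontos)
-- ===== SOURCE B (Python) =====
-- def somar_esquerda(uma_lista):
--     resultado = []
--     pontos = 0
--     locked = False
--     for v in uma_lista:
--         if resultado and not locked and resultado[-1] == v:
--             resultado[-1] = v + v
--             pontos += v + v
--             locked = True
--         else:
--             resultado.append(v)
--             locked = False
--     resultado.extend([0] * (len(uma_lista) - len(resultado)))
--     return (resultado, pontos)
-- ===== Notes on version B (the rewrite author's own statement) =====
-- stated objective: idiomatic
-- what changed: Replaced the index-arithmetic while loop (skip-by-2 on merges plus a separate last-element fixup) by the standard single-pass 2048 merge: iterate over the values, comparing each against the last placed tile with a lock flag that prevents double merges, then pad with zeros in one extend.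
import Mathlib
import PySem

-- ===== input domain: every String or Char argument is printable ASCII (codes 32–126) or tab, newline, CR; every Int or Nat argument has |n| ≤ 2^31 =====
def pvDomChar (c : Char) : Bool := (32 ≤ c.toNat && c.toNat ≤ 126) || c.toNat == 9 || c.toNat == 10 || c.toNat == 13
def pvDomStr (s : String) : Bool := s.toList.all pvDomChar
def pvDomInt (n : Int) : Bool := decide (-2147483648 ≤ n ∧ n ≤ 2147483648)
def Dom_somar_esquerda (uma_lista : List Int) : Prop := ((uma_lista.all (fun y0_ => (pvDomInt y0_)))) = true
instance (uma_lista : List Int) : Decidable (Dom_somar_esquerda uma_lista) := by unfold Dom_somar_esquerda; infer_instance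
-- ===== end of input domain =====

-- B replaces A's index-arithmetic scan (skip-by-2 on merges + last-element fixup) by the
-- idiomatic single-pass 2048 merge against the growing output with a lock flag; same values.

-- ===== PORT A =====
-- A's while loop reads two positions at a time (indice, indice+1), advancing by 2 on a merge
-- and by 1 otherwise; ported as the equivalent recursion consuming the list two-at-a-time.
-- The trailing `if indice==llista-1` branch is the single-element case.
def pvMergeA : List Int → List Int × Int
  | a :: b :: rest =>
      if a = b then
        let soma := a + a
        let (r, p) := pvMergeA rest
        (soma :: r, soma + p)
      else
        let (r, p) := pvMergeA (b :: rest)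
        (a :: r, p)
  | [a] => ([a], 0)
  | [] => ([], 0)

-- A's final `while len(resultado)<llista: resultado.append(0)` loop.
def pvPadA (r : List Int) (n : Nat) : List Int :=
  if r.length < n then pvPadA (r ++ [0]) n else r
termination_by n - r.length
decreasing_by simp_all; omega

def somar_esquerda (uma_lista : List Int) : List Int × Int :=
  let (resultado, pontos) := pvMergeA uma_lista
  (pvPadA resultado uma_lista.length, pontos)

-- ===== PORT B =====
-- Source B's loop body; the result list is kept reversed (Python appends / edits resultado[-1],
-- which is the head of the reversed list).
def pvStep (st : List Int × Bool × Int) (v : Int) : List Int × Bool × Int :=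
  match st with
  | (last :: rest, locked, p) =>
      if !locked && v == last then ((v + v) :: rest, true, p + (v + v))
      else (v :: last :: rest, false, p)
  | ([], _, p) => ([v], false, p)

def somar_esquerda_alt (uma_lista : List Int) : List Int × Int :=
  let (res, _, pontos) := uma_lista.foldl pvStep ([], false, 0)
  (res.reverse ++ List.replicate (uma_lista.length - res.length) 0, pontos)

-- ===== PRECONDITION & SPEC =====
def Spec_somar_esquerda (uma_lista : List Int) (out : List Int × Int) : Prop := out = somar_esquerda_alt uma_lista
instance (uma_lista : List Int) (out : List Int × Int) : Decidable (Spec_somar_esquerda uma_lista out) := by unfold Spec_somar_esquerda; infer_instance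

-- ===== CLAIM (what is proved, stated in full; the proofs are below) =====
def Claim_equal_somar_esquerda : Prop := ∀ (uma_lista : List Int), Dom_somar_esquerda uma_lista → Spec_somar_esquerda uma_lista (somar_esquerda uma_lista)

-- ===== LEMMAS AND PROOFS =====

-- Core invariant: starting B's fold with an UNLOCKED top tile x is the same as running A's
-- merge on x :: l; stated by strong induction on the length bound n.
theorem fold_from_unlocked :
    ∀ (n : Nat) (l : List Int), l.length ≤ n → ∀ (x : Int) (rest : List Int) (p : Int),
      ∃ b : Bool,
        l.foldl pvStep (x :: rest, false, p)
          = ((pvMergeA (x :: l)).1.reverse ++ rest, b, p + (pvMergeA (x :: l)).2) := by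
  intro n
  induction n with
  | zero =>
      intro l hl x rest p
      have : l = [] := List.eq_nil_of_length_eq_zero (Nat.le_zero.mp hl)
      subst this
      exact ⟨false, by simp [pvMergeA]⟩
  | succ n ih =>
      intro l hl x rest p
      match l with
      | [] => exact ⟨false, by simp [pvMergeA]⟩
      | v :: l' =>
        by_cases hvx : v = x
        · -- merge: one step locks the top, then the locked tile is skipped
          subst hvx
          match l' with
          | [] =>
              refine ⟨true, ?_⟩
              simp [pvStep, pvMergeA]
          | w :: l'' =>
              have hlen : l''.length ≤ n := by simp at hl; omega
              obtain ⟨b, hb⟩ := ih l'' hlen w ((v + v) :: rest) (p + (v + v))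
              refine ⟨b, ?_⟩
              simp [pvStep, pvMergeA]
              rw [hb]
              simp [add_assoc]
        · -- no merge: push v unlocked on top
          have hlen : l'.length ≤ n := by simp at hl; omega
          obtain ⟨b, hb⟩ := ih l' hlen v (x :: rest) p
          refine ⟨b, ?_⟩
          have hvx' : (v == x) = false := by simp [hvx]
          simp only [List.foldl, pvStep, Bool.not_false, Bool.true_and, hvx', Bool.false_eq_true,
            if_false, hb]
          have hxv : ¬ x = v := fun h => hvx h.symm
          simp [pvMergeA, hxv]

theorem fold_from_empty (l : List Int) :
    ∃ b : Bool,
      l.foldl pvStep ([], false, 0) = ((pvMergeA l).1.reverse, b, (pvMergeA l).2) := by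
  match l with
  | [] => exact ⟨false, by simp [pvMergeA]⟩
  | v :: l' =>
      obtain ⟨b, hb⟩ := fold_from_unlocked l'.length l' le_rfl v [] 0
      refine ⟨b, ?_⟩
      simp only [List.foldl, pvStep, hb]
      simp

-- A's zero-padding loop equals a single append of replicated zeros.
theorem padA_eq (r : List Int) (n : Nat) :
    pvPadA r n = r ++ List.replicate (n - r.length) 0 := by
  by_cases h : r.length < n
  · rw [pvPadA, if_pos h, padA_eq (r ++ [0]) n]
    have : n - r.length = (n - (r ++ [0]).length) + 1 := by simp; omega
    rw [this, List.replicate_succ]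
    simp
  · rw [pvPadA, if_neg h]
    have : n - r.length = 0 := by omega
    simp [this]
  termination_by n - r.length
  decreasing_by simp; omega

-- ===== VERDICT (by name: the statement is the Claim_ definition above) =====
theorem somar_esquerda_spec : Claim_equal_somar_esquerda := by
  intro l _
  unfold Spec_somar_esquerda somar_esquerda somar_esquerda_alt
  obtain ⟨b, hb⟩ := fold_from_empty l
  rw [hb]
  simp [padA_eq]
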